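-- pv_equiv track=rewrite | github.com/aleksanyan-volodya/NP-problem-graph-Heuristics | TP1/part1.py | max_degre
-- ===== SOURCE A (Python) =====
-- def max_degre(G,not_pic=[])->int:
--     """
--     return le sommet avec le plus haut degré, n'étant pas dans not_pic
--     """
--     m=-1
--     m_s = None
--     for k,s in G.items():
--         if len(s)>m and not(k in not_pic):
--             m=len(s)
--             m_s = k
--     return m_s
-- ===== SOURCE B (Python) =====
-- def max_degre(G, not_pic=[]) -> int:
--     """Two-pass: compute the best eligible degree, then return the first
--     eligible vertex attaining it (same tie-break as iteration order)."""
--     excluded = set(not_pic)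
--     best = None
--     for k, s in G.items():
--         if k not in excluded and (best is None or len(s) > best):
--             best = len(s)
--     if best is None:
--         return None
--     for k, s in G.items():
--         if k not in excluded and len(s) == best:
--             return k
-- ===== Notes on version B (the rewrite author's own statement) =====
-- stated objective: alternative
-- what changed: Replaces A's single argmax-tracking loop (degree and vertex carried together, init m=-1) by two passes with only a scalar between them: first compute the maximum eligible degree (None if no eligible vertex), then scan again and return the first eligible vertex with that degree; the exclusion list is turned into a set once.
import Mathlib
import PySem

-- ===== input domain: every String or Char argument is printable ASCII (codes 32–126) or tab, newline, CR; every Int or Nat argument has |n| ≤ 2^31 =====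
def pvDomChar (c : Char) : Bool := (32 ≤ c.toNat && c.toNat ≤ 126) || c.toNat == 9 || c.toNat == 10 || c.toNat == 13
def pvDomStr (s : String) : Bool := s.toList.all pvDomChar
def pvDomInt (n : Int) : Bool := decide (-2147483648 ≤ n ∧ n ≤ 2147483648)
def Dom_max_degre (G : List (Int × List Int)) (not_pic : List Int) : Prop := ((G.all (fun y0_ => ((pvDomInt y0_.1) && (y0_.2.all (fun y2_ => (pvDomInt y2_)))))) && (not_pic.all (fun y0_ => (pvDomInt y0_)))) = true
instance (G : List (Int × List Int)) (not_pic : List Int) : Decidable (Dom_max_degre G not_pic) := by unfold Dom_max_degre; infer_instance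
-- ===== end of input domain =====

-- ===== PORT A =====
-- A: one fold over G carrying (current max degree m, current argmax m_s), init (-1, none).
def maxDegreStep (not_pic : List Int) (st : Int × Option Int) (p : Int × List Int) : Int × Option Int :=
  if ((p.2.length : Int) > st.1) ∧ ¬ (not_pic.contains p.1) then ((p.2.length : Int), some p.1)
  else st

def max_degre (G : List (Int × List Int)) (not_pic : List Int) : Option Int :=
  (G.foldl (maxDegreStep not_pic) (-1, none)).2

-- ===== PORT B =====
-- B builds 'excluded = set(not_pic)' once (PySem.Set.ofList) and passes it to both passes.
-- B pass 1: fold computing only the best eligible degree as an Option Int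
-- ('k not in excluded and (best is None or len(s) > best)').
def altBestStep (not_pic : List Int) (b : Option Int) (p : Int × List Int) : Option Int :=
  if not_pic.contains p.1 then b
  else match b with
    | none => some (p.2.length : Int)
    | some m => if (p.2.length : Int) > m then some (p.2.length : Int) else b

-- B pass 2: first eligible vertex whose degree equals best (early return).
def altFind (not_pic : List Int) (best : Int) : List (Int × List Int) → Option Int
  | [] => none
  | p :: t => if ¬ (not_pic.contains p.1) ∧ (p.2.length : Int) = best then some p.1
              else altFind not_pic best t

def max_degre_alt (G : List (Int × List Int)) (not_pic : List Int) : Option Int :=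
  let excluded : PySem.Set Int := PySem.Set.ofList not_pic
  match G.foldl (altBestStep excluded) none with
  | none => none
  | some best => altFind excluded best G

-- ===== PRECONDITION & SPEC =====
def Spec_max_degre (G : List (Int × List Int)) (not_pic : List Int) (out : Option Int) : Prop := out = max_degre_alt G not_pic
instance (G : List (Int × List Int)) (not_pic : List Int) (out : Option Int) : Decidable (Spec_max_degre G not_pic out) := by unfold Spec_max_degre; infer_instance

-- ===== CLAIM (what is proved, stated in full; the proofs are below) =====
def Claim_equal_max_degre : Prop := ∀ (G : List (Int × List Int)) (not_pic : List Int), Dom_max_degre G not_pic → Spec_max_degre G not_pic (max_degre G not_pic)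

-- ===== LEMMAS AND PROOFS =====

-- ===== VERDICT (by name: the statement is the Claim_ definition above) =====
-- membership in set(not_pic) agrees with membership in not_pic
theorem contains_ofList_int (xs : List Int) (k : Int) :
    (PySem.Set.ofList xs).contains k = xs.contains k := by
  by_cases h : k ∈ xs <;> simp [PySem.Set.mem_ofList, h]

theorem altBestStep_ofList (np : List Int) :
    altBestStep (PySem.Set.ofList np) = altBestStep np := by
  funext b p
  simp [altBestStep, contains_ofList_int]

theorem altFind_ofList (np : List Int) (best : Int) (G : List (Int × List Int)) :
    altFind (PySem.Set.ofList np) best G = altFind np best G := by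
  induction G with
  | nil => rfl
  | cons p t ih => simp [altFind, contains_ofList_int, ih]

-- the max of m and the eligible degrees of G
def bestAcc (not_pic : List Int) (m : Int) : List (Int × List Int) → Int
  | [] => m
  | p :: t => bestAcc not_pic (if ((p.2.length : Int) > m) ∧ ¬ (not_pic.contains p.1) then (p.2.length : Int) else m) t

theorem bestAcc_ge (not_pic : List Int) (G : List (Int × List Int)) :
    ∀ m : Int, m ≤ bestAcc not_pic m G := by
  induction G with
  | nil => intro m; simp [bestAcc]
  | cons p t ih =>
    intro m
    simp only [bestAcc]
    split_ifs with h
    · exact le_trans (le_of_lt h.1) (ih _)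
    · exact ih m

-- characterisation of A's fold in terms of bestAcc and altFind
theorem foldA_char (not_pic : List Int) (G : List (Int × List Int)) :
    ∀ (m : Int) (ms : Option Int),
      G.foldl (maxDegreStep not_pic) (m, ms) =
        (bestAcc not_pic m G,
         if m < bestAcc not_pic m G then altFind not_pic (bestAcc not_pic m G) G else ms) := by
  induction G with
  | nil => intro m ms; simp [bestAcc]
  | cons p t ih =>
    intro m ms
    simp only [List.foldl, maxDegreStep, bestAcc, altFind]
    by_cases h : ((p.2.length : Int) > m) ∧ ¬ (not_pic.contains p.1)
    · simp only [if_pos h]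
      rw [ih]
      have hge := bestAcc_ge not_pic t (p.2.length : Int)
      have hm : m < bestAcc not_pic (p.2.length : Int) t := lt_of_lt_of_le h.1 hge
      simp only [if_pos hm]
      by_cases he : (p.2.length : Int) < bestAcc not_pic (p.2.length : Int) t
      · simp only [if_pos he]
        have hne : ¬ ((¬ (not_pic.contains p.1)) ∧ (p.2.length : Int) = bestAcc not_pic (p.2.length : Int) t) := by
          rintro ⟨-, he2⟩; omega
        rw [if_neg hne]
      · have heq : (p.2.length : Int) = bestAcc not_pic (p.2.length : Int) t := le_antisymm hge (not_lt.mp he)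
        simp only [if_neg he]
        rw [if_pos ⟨h.2, heq⟩]
    · simp only [if_neg h]
      rw [ih]
      by_cases hm : m < bestAcc not_pic m t
      · simp only [if_pos hm]
        have hne : ¬ ((¬ (not_pic.contains p.1)) ∧ (p.2.length : Int) = bestAcc not_pic m t) := by
          rintro ⟨hc, he⟩
          exact h ⟨by omega, hc⟩
        rw [if_neg hne]
      · simp only [if_neg hm]

-- B's first pass computes bestAcc, starting from a known value
theorem foldB_some (not_pic : List Int) (G : List (Int × List Int)) :
    ∀ m : Int, G.foldl (altBestStep not_pic) (some m) = some (bestAcc not_pic m G) := by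
  induction G with
  | nil => intro m; simp [bestAcc]
  | cons p t ih =>
    intro m
    simp only [List.foldl, altBestStep, bestAcc]
    by_cases hc : not_pic.contains p.1
    · rw [if_pos hc, if_neg (by rintro ⟨-, hn⟩; exact hn hc), ih]
    · rw [if_neg hc]
      by_cases hl : (p.2.length : Int) > m
      · rw [if_pos hl, if_pos ⟨hl, hc⟩, ih]
      · rw [if_neg hl, if_neg (by rintro ⟨h, -⟩; exact hl h), ih]

-- B's first pass from none: none iff no eligible vertex; otherwise it equals bestAcc (-1)
theorem foldB_none_char (not_pic : List Int) (G : List (Int × List Int)) :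
    (G.foldl (altBestStep not_pic) none = none ∧ bestAcc not_pic (-1) G = -1) ∨
    (G.foldl (altBestStep not_pic) none = some (bestAcc not_pic (-1) G) ∧ -1 < bestAcc not_pic (-1) G) := by
  induction G with
  | nil => left; exact ⟨rfl, rfl⟩
  | cons p t ih =>
    simp only [List.foldl, altBestStep, bestAcc]
    by_cases hc : not_pic.contains p.1
    · rw [if_pos hc, if_neg (by rintro ⟨-, hn⟩; exact hn hc)]
      exact ih
    · have hl : (p.2.length : Int) > (-1 : Int) := by
        have : (0 : Int) ≤ (p.2.length : Int) := Int.natCast_nonneg _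
        omega
      rw [if_neg hc, if_pos ⟨hl, hc⟩]
      right
      exact ⟨foldB_some not_pic t _, lt_of_lt_of_le hl (bestAcc_ge not_pic t _)⟩

-- ===== VERDICT (by name: the statement is the Claim_ definition above) =====
theorem max_degre_spec : Claim_equal_max_degre := by
  intro G not_pic _
  unfold Spec_max_degre max_degre max_degre_alt
  simp only [altBestStep_ofList, altFind_ofList]
  rw [foldA_char]
  rcases foldB_none_char not_pic G with ⟨h1, h2⟩ | ⟨h1, h2⟩
  · rw [h1, h2]; simp
  · rw [h1, if_pos h2]
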